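-- pv_equiv track=rewrite | github.com/yisunguk/law | app.py | _lev1
-- ===== SOURCE A (Python) =====
-- def _lev1(a: str, b: str) -> int:
--     # 거리 0/1/2만 빠르게 판별
--     if a == b: return 0
--     if abs(len(a) - len(b)) > 1: return 2
--     # 같은 길이: 치환 1회 이내 검사
--     if len(a) == len(b):
--         diff = sum(1 for x, y in zip(a, b) if x != y)
--         return 1 if diff == 1 else 2
--     # 하나 길이 차: 삽입/삭제 1회 이내 검사
--     if len(a) > len(b): a, b = b, a
--     i = j = edits = 0
--     while i < len(a) and j < len(b):
--         if a[i] == b[j]: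
--             i += 1; j += 1
--         else:
--             edits += 1; j += 1
--             if edits > 1: return 2
--     return 1 if edits <= 1 else 2
-- ===== SOURCE B (Python) =====
-- def _lev1(a: str, b: str) -> int:
--     # common-prefix + single suffix comparison instead of mismatch counting / two-pointer scan
--     if a == b:
--         return 0
--     if len(a) > len(b):
--         a, b = b, a
--     if len(b) - len(a) > 1:
--         return 2
--     p = 0
--     while p < len(a) and a[p] == b[p]:
--         p += 1
--     if len(a) == len(b):
--         return 1 if a[p + 1:] == b[p + 1:] else 2
--     return 1 if a[p:] == b[p + 1:] else 2
-- ===== Notes on version B (the rewrite author's own statement) =====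
-- stated objective: simpler
-- what changed: Replaces A's per-branch machinery (mismatch counting over zip for equal lengths, a three-counter two-pointer skip loop for off-by-one lengths) by one shared mechanism: compute the common-prefix length p, then decide with a single suffix comparison (a[p+1:]==b[p+1:] resp. a[p:]==b[p+1:]).
import Mathlib
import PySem

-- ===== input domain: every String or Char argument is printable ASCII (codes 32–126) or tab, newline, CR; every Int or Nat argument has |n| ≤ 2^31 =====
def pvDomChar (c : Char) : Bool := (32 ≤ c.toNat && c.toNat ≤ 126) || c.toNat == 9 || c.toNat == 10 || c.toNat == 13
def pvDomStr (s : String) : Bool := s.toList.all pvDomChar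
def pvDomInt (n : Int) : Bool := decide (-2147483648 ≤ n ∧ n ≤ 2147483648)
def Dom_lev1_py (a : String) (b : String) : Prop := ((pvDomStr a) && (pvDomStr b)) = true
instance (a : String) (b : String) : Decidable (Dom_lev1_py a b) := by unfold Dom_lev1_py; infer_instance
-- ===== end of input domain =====

-- B replaces A's mismatch-count / two-pointer scan by a common-prefix computation plus one
-- suffix comparison (objective: simpler, same O(n) cost).

-- ===== PORT A =====
-- sum(1 for x, y in zip(a, b) if x != y), as a foldl over the zipped lists
def lev1CntF (acc : Nat) (p : Char × Char) : Nat := if p.1 ≠ p.2 then acc + 1 else acc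

-- A's while loop: i, j, edits; mismatch skips one char of the longer string y
def lev1Loop (x y : List Char) (i j edits : Nat) : Int :=
  if h : i < x.length ∧ j < y.length then
    if x[i]? = y[j]? then lev1Loop x y (i + 1) (j + 1) edits
    else if edits + 1 > 1 then 2
    else lev1Loop x y i (j + 1) (edits + 1)
  else if edits ≤ 1 then 1 else 2
termination_by y.length - j

def lev1_py (a : String) (b : String) : Int :=
  if a == b then 0
  else if 1 < ((a.toList.length : Int) - (b.toList.length : Int)).natAbs then 2
  else if a.toList.length = b.toList.length then
    let diff := (a.toList.zip b.toList).foldl lev1CntF 0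
    if diff = 1 then 1 else 2
  else if a.toList.length > b.toList.length then lev1Loop b.toList a.toList 0 0 0
  else lev1Loop a.toList b.toList 0 0 0

-- ===== PORT B =====
-- B's while loop: p advances while p < len(x) and x[p] == y[p]
def lcpLoop (x y : List Char) (p : Nat) : Nat :=
  if h : p < x.length ∧ x[p]? = y[p]? then lcpLoop x y (p + 1) else p
termination_by x.length - p

def lev1_py_alt (a : String) (b : String) : Int :=
  if a == b then 0
  else
    let x := if a.toList.length > b.toList.length then b.toList else a.toList
    let y := if a.toList.length > b.toList.length then a.toList else b.toList
    if 1 < y.length - x.length then 2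
    else
      let p := lcpLoop x y 0
      if x.length = y.length then
        if x.drop (p + 1) = y.drop (p + 1) then 1 else 2
      else if x.drop p = y.drop (p + 1) then 1 else 2

-- ===== PRECONDITION & SPEC =====
def Spec_lev1_py (a : String) (b : String) (out : Int) : Prop := out = lev1_py_alt a b
instance (a : String) (b : String) (out : Int) : Decidable (Spec_lev1_py a b out) := by unfold Spec_lev1_py; infer_instance

-- ===== CLAIM (what is proved, stated in full; the proofs are below) =====
def Claim_equal_lev1_py : Prop := ∀ (a : String) (b : String), Dom_lev1_py a b → Spec_lev1_py a b (lev1_py a b)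

-- ===== LEMMAS AND PROOFS =====

-- structural longest-common-prefix length
def lcpS : List Char → List Char → Nat
  | [], _ => 0
  | _ :: _, [] => 0
  | x :: xs, y :: ys => if x = y then lcpS xs ys + 1 else 0

-- structural mismatch count over a zipped list
def cntS : List (Char × Char) → Nat
  | [] => 0
  | p :: l => (if p.1 ≠ p.2 then 1 else 0) + cntS l

theorem foldl_cntS (l : List (Char × Char)) : ∀ n : Nat, l.foldl lev1CntF n = n + cntS l := by
  induction l with
  | nil => intro n; simp [cntS]
  | cons p l ih =>
    intro n
    simp only [List.foldl_cons, cntS, lev1CntF, ih]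
    split <;> omega

theorem cntS_zero (x : List Char) : ∀ y : List Char, x.length = y.length →
    (cntS (x.zip y) = 0 ↔ x = y) := by
  induction x with
  | nil => intro y h; cases y <;> simp_all [cntS]
  | cons c xs ih =>
    intro y h
    cases y with
    | nil => simp at h
    | cons d ys =>
      simp only [List.zip_cons_cons, cntS, List.cons.injEq]
      rw [← ih ys (by simpa using h)]
      by_cases hd : c = d <;> simp [hd]

theorem cntS_one (x : List Char) : ∀ y : List Char, x.length = y.length → x ≠ y →
    (cntS (x.zip y) = 1 ↔ x.drop (lcpS x y + 1) = y.drop (lcpS x y + 1)) := by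
  induction x with
  | nil => intro y h hne; cases y <;> simp_all
  | cons c xs ih =>
    intro y h hne
    cases y with
    | nil => simp at h
    | cons d ys =>
      have hlen : xs.length = ys.length := by simpa using h
      by_cases hd : c = d
      · have hne' : xs ≠ ys := by intro e; exact hne (by rw [hd, e])
        simp only [List.zip_cons_cons, cntS, lcpS, hd]
        simpa using ih ys hlen hne'
      · simp only [List.zip_cons_cons, cntS, lcpS, if_neg hd, if_pos (by exact hd : c ≠ d)]
        simp only [Nat.zero_add, List.drop_succ_cons, List.drop_zero]
        constructor
        · intro h1
          exact (cntS_zero xs ys hlen).1 (by omega)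
        · intro he
          have := (cntS_zero xs ys hlen).2 he
          omega

-- bridge: the index-based lcp loop computes the structural lcp of the suffixes
theorem lcpLoop_eq (x y : List Char) : ∀ n p, x.length - p ≤ n →
    lcpLoop x y p = p + lcpS (x.drop p) (y.drop p) := by
  intro n
  induction n with
  | zero =>
    intro p hp
    have hpx : x.length ≤ p := by omega
    rw [lcpLoop]
    have : ¬ (p < x.length ∧ x[p]? = y[p]?) := by
      rintro ⟨h1, _⟩; omega
    rw [dif_neg this, List.drop_eq_nil_of_le hpx]
    simp [lcpS]
  | succ n ih =>
    intro p hp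
    rw [lcpLoop]
    by_cases hc : p < x.length ∧ x[p]? = y[p]?
    · rw [dif_pos hc]
      obtain ⟨h1, h2⟩ := hc
      rw [ih (p + 1) (by omega)]
      have hx : x.drop p = x[p] :: x.drop (p + 1) := List.drop_eq_getElem_cons h1
      have hy' : p < y.length := by
        by_contra hny
        rw [List.getElem?_eq_getElem h1, List.getElem?_eq_none (by omega)] at h2
        simp at h2
      have hxy : x[p] = y[p] := by
        rw [List.getElem?_eq_getElem h1, List.getElem?_eq_getElem hy'] at h2
        exact Option.some.inj h2
      have hy : y.drop p = y[p] :: y.drop (p + 1) := List.drop_eq_getElem_cons hy'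
      rw [hx, hy, lcpS, if_pos hxy]
      omega
    · rw [dif_neg hc]
      rcases Nat.lt_or_ge p x.length with h1 | h1
      · have h2 : x[p]? ≠ y[p]? := fun h => hc ⟨h1, h⟩
        have hx : x.drop p = x[p] :: x.drop (p + 1) := List.drop_eq_getElem_cons h1
        rcases Nat.lt_or_ge p y.length with hy' | hy'
        · have hy : y.drop p = y[p] :: y.drop (p + 1) := List.drop_eq_getElem_cons hy'
          have hne : x[p] ≠ y[p] := by
            intro e
            exact h2 (by rw [List.getElem?_eq_getElem h1, List.getElem?_eq_getElem hy', e])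
          rw [hx, hy, lcpS, if_neg hne]
          omega
        · rw [List.drop_eq_nil_of_le hy', hx]
          simp [lcpS]
      · rw [List.drop_eq_nil_of_le h1]
        simp [lcpS]

-- A's loop after the single skip: returns 1 iff the remaining suffixes coincide
theorem lev1Loop_phase1 (x y : List Char) (hlen : x.length + 1 = y.length) :
    ∀ n i, x.length - i ≤ n →
    lev1Loop x y i (i + 1) 1 = if x.drop i = y.drop (i + 1) then 1 else 2 := by
  intro n
  induction n with
  | zero =>
    intro i hi
    have hix : x.length ≤ i := by omega
    rw [lev1Loop, dif_neg (by rintro ⟨h1, _⟩; omega)]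
    simp [List.drop_eq_nil_of_le hix, List.drop_eq_nil_of_le (show y.length ≤ i + 1 by omega)]
  | succ n ih =>
    intro i hi
    rw [lev1Loop]
    rcases Nat.lt_or_ge i x.length with h1 | h1
    · have h2 : i + 1 < y.length := by omega
      rw [dif_pos ⟨h1, h2⟩]
      have hx : x.drop i = x[i] :: x.drop (i + 1) := List.drop_eq_getElem_cons h1
      have hy : y.drop (i + 1) = y[i+1] :: y.drop (i + 2) := List.drop_eq_getElem_cons h2
      by_cases he : x[i] = y[i+1]
      · rw [if_pos (by rw [List.getElem?_eq_getElem h1, List.getElem?_eq_getElem h2, he])]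
        rw [ih (i + 1) (by omega), hx, hy, he]
        simp only [List.cons.injEq, true_and]
      · rw [if_neg (by
            rw [List.getElem?_eq_getElem h1, List.getElem?_eq_getElem h2]
            simp [he])]
        have hcond : ¬ (List.drop i x = List.drop (i + 1) y) := by
          intro hEq
          rw [hx, hy] at hEq
          injection hEq with hh _
          exact he hh
        rw [if_pos (by omega), if_neg hcond]
    · rw [dif_neg (by rintro ⟨hh, _⟩; omega)]
      simp [List.drop_eq_nil_of_le h1, List.drop_eq_nil_of_le (show y.length ≤ i + 1 by omega)]

-- A's loop from a synchronised position with no edits yet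
theorem lev1Loop_phase0 (x y : List Char) (hlen : x.length + 1 = y.length) :
    ∀ n i, x.length - i ≤ n →
    lev1Loop x y i i 0 =
      (if x.drop (i + lcpS (x.drop i) (y.drop i)) =
          y.drop (i + lcpS (x.drop i) (y.drop i) + 1) then 1 else 2) := by
  intro n
  induction n with
  | zero =>
    intro i hi
    have hix : x.length ≤ i := by omega
    rw [lev1Loop, dif_neg (by rintro ⟨h1, _⟩; omega)]
    simp [List.drop_eq_nil_of_le hix, lcpS,
      List.drop_eq_nil_of_le (show y.length ≤ i + 1 by omega)]
  | succ n ih =>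
    intro i hi
    rw [lev1Loop]
    rcases Nat.lt_or_ge i x.length with h1 | h1
    · have h2 : i < y.length := by omega
      rw [dif_pos ⟨h1, h2⟩]
      have hx : x.drop i = x[i] :: x.drop (i + 1) := List.drop_eq_getElem_cons h1
      have hy : y.drop i = y[i] :: y.drop (i + 1) := List.drop_eq_getElem_cons h2
      by_cases he : x[i] = y[i]
      · rw [if_pos (by rw [List.getElem?_eq_getElem h1, List.getElem?_eq_getElem h2, he])]
        rw [ih (i + 1) (by omega), hx, hy, lcpS, if_pos he]
        have : i + (lcpS (x.drop (i + 1)) (y.drop (i + 1)) + 1)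
             = i + 1 + lcpS (x.drop (i + 1)) (y.drop (i + 1)) := by omega
        rw [this]
      · rw [if_neg (by
            rw [List.getElem?_eq_getElem h1, List.getElem?_eq_getElem h2]
            simp [he])]
        rw [if_neg (by omega)]
        rw [lev1Loop_phase1 x y hlen (x.length - i) i (by omega)]
        rw [hx, hy, lcpS, if_neg he]
        simp only [Nat.add_zero, hx]
    · rw [dif_neg (by rintro ⟨hh, _⟩; omega)]
      simp [List.drop_eq_nil_of_le h1, lcpS,
        List.drop_eq_nil_of_le (show y.length ≤ i + 1 by omega)]

-- ===== VERDICT (by name: the statement is the Claim_ definition above) =====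
theorem lev1_py_spec : Claim_equal_lev1_py := by
  intro a b _
  unfold Spec_lev1_py lev1_py lev1_py_alt
  by_cases hab : a == b
  · simp [hab]
  · rw [if_neg hab, if_neg hab]
    have hne : a.toList ≠ b.toList := by
      intro e
      exact hab (by simp [String.ext_iff] at e ⊢; exact e)
    set xa := a.toList with hxa
    set xb := b.toList with hxb
    rcases Nat.lt_trichotomy xa.length xb.length with hl | hl | hl
    · -- a shorter
      have hswap : ¬ xa.length > xb.length := by omega
      simp only [if_neg hswap]
      by_cases hfar : 1 < xb.length - xa.length
      · rw [if_pos (by omega : 1 < ((xa.length : Int) - (xb.length : Int)).natAbs),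
            if_pos hfar]
      · rw [if_neg (by omega : ¬ 1 < ((xa.length : Int) - (xb.length : Int)).natAbs),
            if_neg hfar, if_neg (by omega : ¬ xa.length = xb.length)]
        have hlcp : lcpLoop xa xb 0 = lcpS xa xb := by
          rw [lcpLoop_eq xa xb xa.length 0 (by omega)]; simp
        have hlen : xa.length + 1 = xb.length := by omega
        simp only [hlcp]
        rw [lev1Loop_phase0 xa xb hlen xa.length 0 (by omega)]
        simp
        intro h
        exact absurd h (by omega)
    · -- equal length
      have hswap : ¬ xa.length > xb.length := by omega
      simp only [if_neg hswap]
      rw [if_neg (by omega : ¬ 1 < ((xa.length : Int) - (xb.length : Int)).natAbs),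
          if_neg (by omega : ¬ 1 < xb.length - xa.length),
          if_pos hl, if_pos hl]
      have hlcp : lcpLoop xa xb 0 = lcpS xa xb := by
        rw [lcpLoop_eq xa xb xa.length 0 (by omega)]; simp
      rw [foldl_cntS]
      simp only [hlcp, Nat.zero_add]
      have hiff := cntS_one xa xb hl hne
      by_cases h1 : cntS (xa.zip xb) = 1
      · rw [if_pos h1, if_pos (hiff.1 h1)]
      · rw [if_neg h1, if_neg (fun he => h1 (hiff.2 he))]
    · -- a longer
      have hswap : xa.length > xb.length := hl
      simp only [if_pos hswap]
      by_cases hfar : 1 < xa.length - xb.length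
      · rw [if_pos (by omega : 1 < ((xa.length : Int) - (xb.length : Int)).natAbs),
            if_pos (by omega : 1 < xa.length - xb.length)]
      · rw [if_neg (by omega : ¬ 1 < ((xa.length : Int) - (xb.length : Int)).natAbs),
            if_neg (by omega : ¬ 1 < xa.length - xb.length),
            if_neg (by omega : ¬ xa.length = xb.length),
            if_neg (by omega : ¬ xb.length = xa.length)]
        have hlcp : lcpLoop xb xa 0 = lcpS xb xa := by
          rw [lcpLoop_eq xb xa xb.length 0 (by omega)]; simp
        have hlen : xb.length + 1 = xa.length := by omega
        simp only [hlcp]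
        rw [lev1Loop_phase0 xb xa hlen xb.length 0 (by omega)]
        simp
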